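-- pv_equiv track=rewrite | github.com/9907daniel/good_solutions | Heap/230721_142085_디펜스게임/142085.py | solution
-- ===== SOURCE A (Python) =====
-- from heapq import heappush, heappop
--
-- def solution(n, k, enemy):
--     h = []
--     count = 0
--     for a in range(len(enemy)):
--         heappush(h, -enemy[a])
--
--         # 반례 > 0 일때..? --> 왜..?
--         if n-enemy[a] >= 0:
--             n -= enemy[a]
--         elif k > 0 and n-enemy[a] <= 0:
--             x = -heappop(h)
--             n += x
--             n -= enemy[a]
--             k -= 1
--         else:
--             break
--         count += 1
--     return count
-- ===== SOURCE B (Python) =====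
-- from heapq import heappush, heappop
--
-- def solution(n, k, enemy):
--     # Keep a min-heap of the (at most k) waves chosen to skip, and the running
--     # damage `paid` actually taken; a wave evicted from the heap is paid.
--     skip = []
--     paid = 0
--     count = 0
--     for e in enemy:
--         heappush(skip, e)
--         if len(skip) > k:
--             paid += heappop(skip)
--         if paid > n:
--             break
--         count += 1
--     return count
-- ===== Notes on version B (the rewrite author's own statement) =====
-- stated objective: alternative
-- what changed: A keeps a max-heap of all waves seen and, when it cannot pay, refunds the largest past wave (restoring n) and decrements k; B instead keeps a min-heap of at most k waves chosen to be skipped plus a running sum `paid` of damage actually taken, evicting the smallest skip candidate into `paid` when the heap overflows and stopping when paid > n.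
-- outside the precondition, e.g. on solution(-1, 4, [8, -7, -6, -4, -9]): A returns 5, B returns 0; on solution(4, 4, [5, 6, -5, 9, 4, 8, 10]): A returns 6, B returns 7; on solution(-5, 2, [3]): A returns 1, B returns 0
import Mathlib
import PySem

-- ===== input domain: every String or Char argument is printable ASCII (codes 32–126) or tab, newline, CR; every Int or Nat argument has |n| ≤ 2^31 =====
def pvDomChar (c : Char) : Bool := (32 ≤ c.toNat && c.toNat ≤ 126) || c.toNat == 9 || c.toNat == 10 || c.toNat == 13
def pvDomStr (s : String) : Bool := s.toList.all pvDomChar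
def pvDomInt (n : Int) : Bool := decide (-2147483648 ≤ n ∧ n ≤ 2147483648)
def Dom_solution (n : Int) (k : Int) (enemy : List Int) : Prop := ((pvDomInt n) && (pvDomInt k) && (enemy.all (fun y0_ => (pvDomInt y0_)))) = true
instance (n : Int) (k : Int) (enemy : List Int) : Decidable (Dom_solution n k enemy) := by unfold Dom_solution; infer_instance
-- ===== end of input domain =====

-- B replaces A's "refund the largest past wave" max-heap loop by a capped min-heap of the
-- waves chosen to be skipped plus a running sum of the damage actually paid (alternative
-- decomposition, same cost class).

-- Shared model of the `heapq` library used by both Pythons: a heap is a bag of Ints;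
-- heappush is cons, heappop returns the minimum value and removes one occurrence of it.
-- Exact for Int elements: heapq's pop returns the minimum, and which equal occurrence
-- is removed is unobservable.
def heapPop (h : List Int) : Int × List Int :=
  match h.min? with
  | some m => (m, h.erase m)
  | none => (0, [])  -- unreachable: both programs only pop a nonempty heap

-- ===== PORT A =====
-- literal transliteration of A's loop: push -enemy[a]; pay if affordable, else if k>0
-- refund the max (pop the min of the negated heap) and pay, else break.
def solGoA (n : Int) (k : Int) (h : List Int) (count : Int) : List Int → Int
  | [] => count
  | e :: rest =>
    let h1 := (-e) :: h
    if 0 ≤ n - e then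
      solGoA (n - e) k h1 (count + 1) rest
    else if 0 < k ∧ n - e ≤ 0 then
      let p := heapPop h1
      solGoA (n + (-p.1) - e) (k - 1) p.2 (count + 1) rest
    else count

def solution (n : Int) (k : Int) (enemy : List Int) : Int :=
  solGoA n k [] 0 enemy

-- ===== PORT B =====
-- literal transliteration of B: push e onto the skip min-heap; if it overflows k, evict
-- the smallest into `paid`; stop as soon as paid > n.
def solGoB (n : Int) (k : Int) (skip : List Int) (paid : Int) (count : Int) : List Int → Int
  | [] => count
  | e :: rest =>
    let s1 := e :: skip
    let st := if (s1.length : Int) > k then ((heapPop s1).2, paid + (heapPop s1).1) else (s1, paid)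
    if st.2 > n then count
    else solGoB n k st.1 st.2 (count + 1) rest

def solution_alt (n : Int) (k : Int) (enemy : List Int) : Int :=
  solGoB n k [] 0 0 enemy

-- ===== PRECONDITION & SPEC =====
-- Pre_ restricts to the game's natural domain (nonnegative wave damages, and health that
-- is nonnegative unless no skips/waves remain): on negative damages, or negative health
-- combined with available skips, A's refund greedy and B's skip-set greedy are two equally
-- accidental readings of an unspecified input and legitimately return different counts.
def Pre_solution (n : Int) (k : Int) (enemy : List Int) : Prop :=
  (∀ e ∈ enemy, 0 ≤ e) ∧ (0 ≤ n ∨ k ≤ 0 ∨ enemy = [])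
instance (n : Int) (k : Int) (enemy : List Int) : Decidable (Pre_solution n k enemy) := by
  unfold Pre_solution; infer_instance

def pvWitness_solution : Int × Int × List Int := (10, 1, [3, 5, 4])

def Spec_solution (n : Int) (k : Int) (enemy : List Int) (out : Int) : Prop := out = solution_alt n k enemy
instance (n : Int) (k : Int) (enemy : List Int) (out : Int) : Decidable (Spec_solution n k enemy out) := by unfold Spec_solution; infer_instance

-- ===== CLAIM (what is proved, stated in full; the proofs are below) =====
def Claim_equal_solution : Prop := ∀ (n : Int) (k : Int) (enemy : List Int), Dom_solution n k enemy → Pre_solution n k enemy → Spec_solution n k enemy (solution n k enemy)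

-- ===== LEMMAS AND PROOFS =====

-- the bag of (positive) wave values still held in A's negated heap
def negMS (h : List Int) : Multiset Int := ((h.map (fun x => -x) : List Int) : Multiset Int)

lemma negMS_cons (e : Int) (h : List Int) : negMS ((-e) :: h) = e ::ₘ negMS h := by
  simp [negMS]

lemma heapPop_spec (h : List Int) (hne : h ≠ []) :
    (heapPop h).1 ∈ h ∧ (∀ x ∈ h, (heapPop h).1 ≤ x) ∧
      ((heapPop h).2 : Multiset Int) = (h : Multiset Int).erase (heapPop h).1 := by
  obtain ⟨m, hm⟩ : ∃ m, h.min? = some m := by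
    cases hh : h.min? with
    | none => exact absurd (List.min?_eq_none_iff.mp hh) hne
    | some m => exact ⟨m, rfl⟩
  have hspec := List.min?_eq_some_iff.mp hm
  simp only [heapPop, hm]
  exact ⟨hspec.1, hspec.2, (Multiset.coe_erase h m).symm⟩

lemma sum_erase_ms (s : Multiset Int) (a : Int) (h : a ∈ s) : (s.erase a).sum = s.sum - a := by
  have h2 : s.sum = a + (s.erase a).sum := by
    rw [← Multiset.sum_cons, Multiset.cons_erase h]
  omega

lemma addConsSwap (a : Int) (s t : Multiset Int) : a ::ₘ (s + t) = s + (a ::ₘ t) := by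
  rw [← Multiset.singleton_add, ← Multiset.singleton_add, add_left_comm]

-- Main invariant lemma.  Ghost state: Q = bag of waves A has refunded ("skipped") so far,
-- S = bag of waves B currently holds in its skip heap beyond Q.  The invariant says B's
-- heap is exactly Q plus a top-(min k |P|) selection S of A's held bag P, A's n equals
-- the original n minus the sum of P, and B's paid equals sum P - sum S.
lemma loop_eq : ∀ (rest : List Int) (nA kA : Int) (h : List Int) (cnt : Int)
    (Q S : Multiset Int) (skip : List Int) (paid : Int),
    (∀ x ∈ rest, 0 ≤ x) →
    (∀ p ∈ negMS h, 0 ≤ p) →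
    0 ≤ nA →
    (∀ q ∈ Q, nA < q) →
    (∀ p ∈ negMS h, ∀ q ∈ Q, p ≤ q) →
    S ≤ negMS h →
    ((S.card : Int) = max (min kA (h.length : Int)) 0) →
    (∀ a ∈ negMS h - S, ∀ b ∈ S, a ≤ b) →
    ((skip : Multiset Int) = Q + S) →
    (paid = (negMS h).sum - S.sum) →
    solGoA nA kA h cnt rest = solGoB (nA + (negMS h).sum) (kA + Q.card) skip paid cnt rest := by
  intro rest
  induction rest with
  | nil => intro _ _ _ _ _ _ _ _ _ _ _ _ _ _ _ _ _ _; rfl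
  | cons e rest ih =>
    intro nA kA h cnt Q S skip paid hrest hP0 hn hQn hPQ hSP hcard hout hskip hpaid
    have he : 0 ≤ e := hrest e (by simp)
    have hrest' : ∀ x ∈ rest, 0 ≤ x := fun x hx => hrest x (by simp [hx])
    have hS0 : ∀ b ∈ S, 0 ≤ b := fun b hb => hP0 b (Multiset.mem_of_le hSP hb)
    have hlenP : (negMS h).card = h.length := by simp [negMS]
    have hskiplen : skip.length = Q.card + S.card := by
      rw [← Multiset.coe_card, hskip, Multiset.card_add]
    have hs1 : ((e :: skip : List Int) : Multiset Int) = Q + (e ::ₘ S) := by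
      show e ::ₘ (skip : Multiset Int) = Q + (e ::ₘ S)
      rw [hskip, addConsSwap]
    have hPsum0 : 0 ≤ (negMS h).sum := Multiset.sum_nonneg hP0
    have hSsum0 : 0 ≤ S.sum := Multiset.sum_nonneg hS0
    by_cases hpay : 0 ≤ nA - e
    · -- A pays the wave
      rw [show solGoA nA kA h cnt (e :: rest)
          = solGoA (nA - e) kA ((-e) :: h) (cnt + 1) rest by
        simp only [solGoA]; rw [if_pos hpay]]
      by_cases hpop : kA ≤ (S.card : Int)
      · -- B's heap overflows: evict the minimum m into paid
        have hs1ne : (e :: skip : List Int) ≠ [] := by simp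
        obtain ⟨hm_mem, hm_min, hm_erase⟩ := heapPop_spec (e :: skip) hs1ne
        set m := (heapPop (e :: skip)).1 with hmdef
        have hm_min' : ∀ x ∈ Q + (e ::ₘ S), m ≤ x := by
          intro x hx; exact hm_min x (by rw [← Multiset.mem_coe, hs1]; exact hx)
        have hme : m ≤ e := hm_min' e (by simp)
        have hmX : m ∈ e ::ₘ S := by
          have : m ∈ Q + (e ::ₘ S) := by rw [← hs1]; exact hm_mem
          rcases Multiset.mem_add.mp this with hq | hx
          · exact absurd (hQn m hq) (by omega)
          · exact hx
        have herase2 : ((heapPop (e :: skip)).2 : Multiset Int) = Q + (e ::ₘ S).erase m := by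
          rw [hm_erase, hs1, Multiset.erase_add_right_pos _ hmX]
        have hcond : ((e :: skip).length : Int) > kA + Q.card := by
          simp only [List.length_cons, hskiplen]; push_cast; omega
        rw [show solGoB (nA + (negMS h).sum) (kA + Q.card) skip paid cnt (e :: rest)
            = solGoB (nA + (negMS h).sum) (kA + Q.card) (heapPop (e :: skip)).2
                (paid + m) (cnt + 1) rest by
          simp only [solGoB]
          rw [if_pos hcond, if_neg (by push_neg; rw [← hmdef]; omega)]]
        have hm0 : 0 ≤ m := by
          rcases Multiset.mem_cons.mp hmX with h1 | h1
          · omega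
          · exact hS0 m h1
        have key := ih (nA - e) kA ((-e) :: h) (cnt + 1) Q ((e ::ₘ S).erase m)
          (heapPop (e :: skip)).2 (paid + m) hrest'
          (by rw [negMS_cons]; intro p hp
              rcases Multiset.mem_cons.mp hp with h1 | h1
              · omega
              · exact hP0 p h1)
          hpay
          (fun q hq => by have := hQn q hq; omega)
          (by rw [negMS_cons]; intro p hp q hq
              rcases Multiset.mem_cons.mp hp with h1 | h1
              · have := hQn q hq; omega
              · exact hPQ p h1 q hq)
          (by rw [negMS_cons]
              exact le_trans (Multiset.erase_le m _) (Multiset.cons_le_cons e hSP))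
          (by have hc1 : ((e ::ₘ S).erase m).card + 1 = (e ::ₘ S).card :=
                Multiset.card_erase_add_one hmX
              simp only [Multiset.card_cons, List.length_cons] at hc1 ⊢
              push_cast
              push_cast [hlenP] at hcard
              omega)
          (by rw [negMS_cons]
              -- outside bag is (P - S) + {m}
              have hdecomp : e ::ₘ negMS h = (e ::ₘ S).erase m + ((negMS h - S) + {m}) := by
                calc e ::ₘ negMS h = e ::ₘ (S + (negMS h - S)) := by
                      rw [add_comm S, tsub_add_cancel_of_le hSP]
                  _ = (e ::ₘ S) + (negMS h - S) := by rw [Multiset.cons_add]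
                  _ = ((e ::ₘ S).erase m + {m}) + (negMS h - S) := by
                      rw [add_comm _ ({m} : Multiset Int), Multiset.singleton_add,
                        Multiset.cons_erase hmX]
                  _ = (e ::ₘ S).erase m + ((negMS h - S) + {m}) := by
                      rw [add_assoc, add_comm ({m} : Multiset Int) (negMS h - S)]
              rw [hdecomp, add_tsub_cancel_left]
              intro a ha b hb
              have hbX : b ∈ e ::ₘ S := Multiset.mem_of_le (Multiset.erase_le m _) hb
              rcases Multiset.mem_add.mp ha with hao | ham
              · -- a comes from the old outside bag
                rcases Multiset.mem_cons.mp hbX with hbe | hbS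
                · -- b = e : show a ≤ e
                  by_cases hmeq : m = e
                  · have hbS' : b ∈ S := by
                      rw [hmeq, Multiset.erase_cons_head] at hb
                      exact hb
                    exact hout a hao b hbS'
                  · have hmS : m ∈ S := by
                      rcases Multiset.mem_cons.mp hmX with h1 | h1
                      · exact absurd h1 hmeq
                      · exact h1
                    rw [hbe]
                    exact le_trans (hout a hao m hmS) hme
                · exact hout a hao b hbS
              · -- a = m
                rw [Multiset.mem_singleton.mp ham]
                exact hm_min' b (Multiset.mem_add.mpr (Or.inr hbX)))
          herase2
          (by rw [negMS_cons, sum_erase_ms _ _ hmX, Multiset.sum_cons, Multiset.sum_cons]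
              omega)
        rw [key, negMS_cons, Multiset.sum_cons,
          show nA - e + (e + (negMS h).sum) = nA + (negMS h).sum from by ring]
      · -- B's heap still below k: no eviction, and S must already be all of P
        push_neg at hpop
        have hSfull : S = negMS h := by
          refine Multiset.eq_of_le_of_card_le hSP ?_
          push_cast [hlenP] at hcard ⊢
          omega
        have hlenlt : (h.length : Int) < kA := by
          push_cast [hlenP] at hcard
          rw [hSfull, hlenP] at hpop
          omega
        have hpaid0 : paid = 0 := by rw [hpaid, hSfull]; omega
        have hcond : ¬ ((e :: skip).length : Int) > kA + Q.card := by
          simp only [List.length_cons, hskiplen]; push_cast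
          rw [hSfull, hlenP] at hpop ⊢
          omega
        rw [show solGoB (nA + (negMS h).sum) (kA + Q.card) skip paid cnt (e :: rest)
            = solGoB (nA + (negMS h).sum) (kA + Q.card) (e :: skip) paid (cnt + 1) rest by
          simp only [solGoB]
          rw [if_neg hcond, if_neg (by push_neg; omega)]]
        have key := ih (nA - e) kA ((-e) :: h) (cnt + 1) Q (e ::ₘ S)
          (e :: skip) paid hrest'
          (by rw [negMS_cons]; intro p hp
              rcases Multiset.mem_cons.mp hp with h1 | h1
              · omega
              · exact hP0 p h1)
          hpay
          (fun q hq => by have := hQn q hq; omega)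
          (by rw [negMS_cons]; intro p hp q hq
              rcases Multiset.mem_cons.mp hp with h1 | h1
              · have := hQn q hq; omega
              · exact hPQ p h1 q hq)
          (by rw [negMS_cons]; exact Multiset.cons_le_cons e hSP)
          (by simp only [Multiset.card_cons, List.length_cons]
              push_cast
              push_cast [hlenP] at hcard
              omega)
          (by rw [negMS_cons, hSfull]
              simp)
          hs1
          (by rw [negMS_cons, Multiset.sum_cons, Multiset.sum_cons, hpaid, hSfull]; ring)
        rw [key, negMS_cons, Multiset.sum_cons,
          show nA - e + (e + (negMS h).sum) = nA + (negMS h).sum from by ring]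
    · -- A cannot pay this wave
      by_cases hk : 0 < kA
      · -- A refunds the largest wave seen (x) and pays
        have h1ne : ((-e) :: h : List Int) ≠ [] := by simp
        obtain ⟨hx_mem, hx_min, hx_erase⟩ := heapPop_spec ((-e) :: h) h1ne
        set mneg := (heapPop ((-e) :: h)).1 with hmnegdef
        set x := -mneg with hxdef
        have hP' : negMS ((heapPop ((-e) :: h)).2) = (e ::ₘ negMS h).erase x := by
          have : negMS ((heapPop ((-e) :: h)).2)
              = Multiset.map (fun y => -y) ((heapPop ((-e) :: h)).2 : Multiset Int) := by
            simp [negMS]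
          rw [this, hx_erase,
            Multiset.map_erase _ (fun a b hab => by simpa using hab : Function.Injective (fun y : Int => -y)),
            ← negMS_cons]
          rfl
        have hxP' : x ∈ e ::ₘ negMS h := by
          rw [← negMS_cons]
          simp only [negMS, Multiset.mem_coe, List.mem_map]
          exact ⟨mneg, hx_mem, rfl⟩
        have hxmax : ∀ p ∈ e ::ₘ negMS h, p ≤ x := by
          intro p hp
          rw [← negMS_cons] at hp
          simp only [negMS, Multiset.mem_coe, List.mem_map] at hp
          obtain ⟨y, hy, hyp⟩ := hp
          have := hx_min y hy
          omega
        have hex : e ≤ x := hxmax e (Multiset.mem_cons_self e _)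
        have hcase : x = e ∨ x ∈ negMS h := Multiset.mem_cons.mp hxP'
        have hAstep : solGoA nA kA h cnt (e :: rest)
            = solGoA (nA + x - e) (kA - 1) (heapPop ((-e) :: h)).2 (cnt + 1) rest := by
          simp only [solGoA]
          rw [if_neg hpay, if_pos ⟨hk, by omega⟩]
        rw [hAstep]
        have hlen2 : ((heapPop ((-e) :: h)).2).length = h.length := by
          have h5 := congrArg Multiset.card hP'
          have h6 : ((e ::ₘ negMS h).erase x).card + 1 = (e ::ₘ negMS h).card :=
            Multiset.card_erase_add_one hxP'
          simp only [negMS, Multiset.coe_card, List.length_map, Multiset.card_cons] at h5 h6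
          omega
        have hsum2 : (negMS ((heapPop ((-e) :: h)).2)).sum = e + (negMS h).sum - x := by
          rw [hP', sum_erase_ms _ _ hxP', Multiset.sum_cons]
        by_cases hpop : kA ≤ (S.card : Int)
        · -- B also evicts its minimum m
          have hkcard : (S.card : Int) = kA := by
            push_cast [hlenP] at hcard; omega
          have hSne : S ≠ 0 := by
            intro h0; rw [h0] at hkcard; simp at hkcard; omega
          have hs1ne : (e :: skip : List Int) ≠ [] := by simp
          obtain ⟨hm_mem, hm_min, hm_erase⟩ := heapPop_spec (e :: skip) hs1ne
          set m := (heapPop (e :: skip)).1 with hmdef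
          have hm_min' : ∀ y ∈ Q + (e ::ₘ S), m ≤ y := by
            intro y hy; exact hm_min y (by rw [← Multiset.mem_coe, hs1]; exact hy)
          have hme : m ≤ e := hm_min' e (by simp)
          have hmX : m ∈ e ::ₘ S := by
            have : m ∈ Q + (e ::ₘ S) := by rw [← hs1]; exact hm_mem
            rcases Multiset.mem_add.mp this with hq | hxx
            · obtain ⟨s0, hs0⟩ := Multiset.exists_mem_of_ne_zero hSne
              have h1 : s0 ≤ m := hPQ s0 (Multiset.mem_of_le hSP hs0) m hq
              have h2 : m ≤ s0 := hm_min' s0 (Multiset.mem_add.mpr (Or.inr (Multiset.mem_cons_of_mem hs0)))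
              have : m = s0 := le_antisymm h2 h1
              exact Multiset.mem_cons_of_mem (this ▸ hs0)
            · exact hxx
          have herase2 : ((heapPop (e :: skip)).2 : Multiset Int) = Q + (e ::ₘ S).erase m := by
            rw [hm_erase, hs1, Multiset.erase_add_right_pos _ hmX]
          have hm0 : 0 ≤ m := by
            rcases Multiset.mem_cons.mp hmX with h1 | h1
            · omega
            · exact hS0 m h1
          have hmSsum : m ≤ S.sum := by
            obtain ⟨s0, hs0⟩ := Multiset.exists_mem_of_ne_zero hSne
            have h1 : m ≤ s0 := hm_min' s0 (Multiset.mem_add.mpr (Or.inr (Multiset.mem_cons_of_mem hs0)))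
            have h2 : S.sum = s0 + (S.erase s0).sum := by
              rw [← Multiset.sum_cons, Multiset.cons_erase hs0]
            have h3 : 0 ≤ (S.erase s0).sum :=
              Multiset.sum_nonneg (fun b hb => hS0 b (Multiset.mem_of_le (Multiset.erase_le _ _) hb))
            omega
          have hcond : ((e :: skip).length : Int) > kA + Q.card := by
            simp only [List.length_cons, hskiplen]; push_cast; omega
          rw [show solGoB (nA + (negMS h).sum) (kA + Q.card) skip paid cnt (e :: rest)
              = solGoB (nA + (negMS h).sum) (kA + Q.card) (heapPop (e :: skip)).2
                  (paid + m) (cnt + 1) rest by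
            simp only [solGoB]
            rw [if_pos hcond, if_neg (by push_neg; rw [← hmdef]; omega)]]
          -- x sits inside B's post-eviction heap: remove it as the newly skipped wave
          have hSsub : e ::ₘ S ≤ e ::ₘ negMS h := Multiset.cons_le_cons e hSP
          have hxX : x ∈ e ::ₘ S := by
            rcases hcase with hxe | hxP
            · rw [hxe]; simp
            · by_cases hxS : x ∈ S
              · exact Multiset.mem_cons_of_mem hxS
              · exfalso
                have hcount : x ∈ negMS h - S := by
                  rw [← Multiset.count_pos, Multiset.count_sub]
                  have h1 : 0 < (negMS h).count x := Multiset.count_pos.mpr hxP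
                  have h2 : S.count x = 0 := Multiset.count_eq_zero.mpr hxS
                  omega
                obtain ⟨s0, hs0⟩ := Multiset.exists_mem_of_ne_zero hSne
                have h1 : x ≤ s0 := hout x hcount s0 hs0
                have h2 : s0 ≤ x := hxmax s0 (Multiset.mem_cons_of_mem (Multiset.mem_of_le hSP hs0))
                have : x = s0 := le_antisymm h1 h2
                exact hxS (this ▸ hs0)
          have hxS' : x ∈ (e ::ₘ S).erase m := by
            by_cases hmx : x = m
            · have hall : ∀ y ∈ e ::ₘ S, x = y := by
                intro y hy
                have h1 : m ≤ y := hm_min' y (Multiset.mem_add.mpr (Or.inr hy))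
                have h2 : y ≤ x := hxmax y (Multiset.mem_of_le hSsub hy)
                omega
              have hcnt : (e ::ₘ S).count x = (e ::ₘ S).card := Multiset.count_eq_card.mpr hall
              have hc2 : 2 ≤ (e ::ₘ S).card := by
                rw [Multiset.card_cons]
                have : 1 ≤ S.card := by
                  by_contra hc
                  push_neg at hc
                  interval_cases hS : S.card
                  · push_cast [hS] at hkcard; omega
                omega
              have hce := Multiset.count_erase_self x (e ::ₘ S)
              rw [← hmx]
              refine Multiset.count_pos.mp ?_
              omega
            · rw [Multiset.mem_erase_of_ne hmx]; exact hxX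
          have key := ih (nA + x - e) (kA - 1) (heapPop ((-e) :: h)).2 (cnt + 1)
            (x ::ₘ Q) (((e ::ₘ S).erase m).erase x) (heapPop (e :: skip)).2 (paid + m)
            hrest'
            (by rw [hP']; intro p hp
                have : p ∈ e ::ₘ negMS h := Multiset.mem_of_le (Multiset.erase_le _ _) hp
                rcases Multiset.mem_cons.mp this with h1 | h1
                · omega
                · exact hP0 p h1)
            (by omega)
            (by intro q hq
                rcases Multiset.mem_cons.mp hq with h1 | h1
                · omega
                · rcases hcase with hxe | hxP
                  · have := hQn q h1; omega
                  · have := hPQ x hxP q h1; have := hQn q h1; omega)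
            (by rw [hP']; intro p hp q hq
                have hpP' : p ∈ e ::ₘ negMS h := Multiset.mem_of_le (Multiset.erase_le _ _) hp
                rcases Multiset.mem_cons.mp hq with h1 | h1
                · rw [h1]; exact hxmax p hpP'
                · rcases Multiset.mem_cons.mp hpP' with h2 | h2
                  · -- p = e : show e ≤ q
                    by_contra hcon
                    push_neg at hcon
                    have hxe : x = e := by
                      rcases hcase with h3 | h3
                      · exact h3
                      · have := hPQ x h3 q h1; omega
                    have : p ∈ negMS h := by
                      rw [hxe, Multiset.erase_cons_head] at hp; exact hp
                    have := hPQ p this q h1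
                    omega
                  · exact hPQ p h2 q h1)
            (by rw [hP']
                exact Multiset.erase_le_erase x (le_trans (Multiset.erase_le m _) hSsub))
            (by have hc1 : (((e ::ₘ S).erase m).erase x).card + 1 = ((e ::ₘ S).erase m).card :=
                  Multiset.card_erase_add_one hxS'
                have hc2 : ((e ::ₘ S).erase m).card + 1 = (e ::ₘ S).card :=
                  Multiset.card_erase_add_one hmX
                simp only [Multiset.card_cons] at hc1 hc2 ⊢
                rw [hlen2]
                push_cast
                push_cast [hlenP] at hcard
                omega)
            (by -- outside bag is (P - S) + {m}
                rw [hP']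
                have hXdec : (e ::ₘ S) = m ::ₘ x ::ₘ ((e ::ₘ S).erase m).erase x := by
                  rw [Multiset.cons_erase hxS', Multiset.cons_erase hmX]
                have hdecomp : (e ::ₘ negMS h).erase x
                    = ((e ::ₘ S).erase m).erase x + ((negMS h - S) + {m}) := by
                  have hfull : e ::ₘ negMS h
                      = x ::ₘ (((e ::ₘ S).erase m).erase x + ((negMS h - S) + {m})) := by
                    calc e ::ₘ negMS h = e ::ₘ (S + (negMS h - S)) := by
                          rw [add_comm S, tsub_add_cancel_of_le hSP]
                      _ = (e ::ₘ S) + (negMS h - S) := by rw [Multiset.cons_add]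
                      _ = (m ::ₘ x ::ₘ ((e ::ₘ S).erase m).erase x) + (negMS h - S) := by
                          rw [← hXdec]
                      _ = x ::ₘ m ::ₘ (((e ::ₘ S).erase m).erase x + (negMS h - S)) := by
                          rw [Multiset.cons_add, Multiset.cons_add, Multiset.cons_swap]
                      _ = x ::ₘ (((e ::ₘ S).erase m).erase x + ((negMS h - S) + {m})) := by
                          congr 1
                          rw [← Multiset.singleton_add, add_comm ({m} : Multiset Int), add_assoc]
                  rw [hfull, Multiset.erase_cons_head]
                rw [hdecomp, add_tsub_cancel_left]
                intro a ha b hb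
                have hbX : b ∈ e ::ₘ S :=
                  Multiset.mem_of_le (le_trans (Multiset.erase_le x _) (Multiset.erase_le m _)) hb
                rcases Multiset.mem_add.mp ha with hao | ham
                · rcases Multiset.mem_cons.mp hbX with hbe | hbS
                  · by_cases hmeq : m = e
                    · have hbS' : b ∈ S := by
                        have h7 := Multiset.mem_of_le (Multiset.erase_le x _) hb
                        rw [hmeq, Multiset.erase_cons_head] at h7
                        exact h7
                      exact hout a hao b hbS'
                    · have hmS : m ∈ S := by
                        rcases Multiset.mem_cons.mp hmX with h1 | h1
                        · exact absurd h1 hmeq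
                        · exact h1
                      rw [hbe]
                      exact le_trans (hout a hao m hmS) hme
                  · exact hout a hao b hbS
                · rw [Multiset.mem_singleton.mp ham]
                  exact hm_min' b (Multiset.mem_add.mpr (Or.inr hbX)))
            (by rw [herase2, Multiset.cons_add, addConsSwap, Multiset.cons_erase hxS'])
            (by rw [hsum2, sum_erase_ms _ _ hxS', sum_erase_ms _ _ hmX, Multiset.sum_cons,
                  hpaid]
                omega)
          rw [key, hsum2, Multiset.card_cons,
            show nA + x - e + (e + (negMS h).sum - x) = nA + (negMS h).sum from by ring,
            show (((Q.card + 1 : Nat)) : Int) = (Q.card : Int) + 1 from by push_cast; ring,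
            show kA - 1 + ((Q.card : Int) + 1) = kA + Q.card from by ring]
        · -- B keeps the pushed wave: S was all of P, and x joins the skipped bag
          push_neg at hpop
          have hSfull : S = negMS h := by
            refine Multiset.eq_of_le_of_card_le hSP ?_
            push_cast [hlenP] at hcard
            omega
          have hlenlt : (h.length : Int) < kA := by
            push_cast [hlenP] at hcard
            rw [hSfull, hlenP] at hpop
            omega
          have hpaid0 : paid = 0 := by rw [hpaid, hSfull]; omega
          have hcond : ¬ ((e :: skip).length : Int) > kA + Q.card := by
            simp only [List.length_cons, hskiplen]; push_cast
            rw [hSfull, hlenP] at hpop ⊢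
            omega
          rw [show solGoB (nA + (negMS h).sum) (kA + Q.card) skip paid cnt (e :: rest)
              = solGoB (nA + (negMS h).sum) (kA + Q.card) (e :: skip) paid (cnt + 1) rest by
            simp only [solGoB]
            rw [if_neg hcond, if_neg (by push_neg; omega)]]
          have key := ih (nA + x - e) (kA - 1) (heapPop ((-e) :: h)).2 (cnt + 1)
            (x ::ₘ Q) (negMS ((heapPop ((-e) :: h)).2)) (e :: skip) paid
            hrest'
            (by rw [hP']; intro p hp
                have : p ∈ e ::ₘ negMS h := Multiset.mem_of_le (Multiset.erase_le _ _) hp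
                rcases Multiset.mem_cons.mp this with h1 | h1
                · omega
                · exact hP0 p h1)
            (by omega)
            (by intro q hq
                rcases Multiset.mem_cons.mp hq with h1 | h1
                · omega
                · rcases hcase with hxe | hxP
                  · have := hQn q h1; omega
                  · have := hPQ x hxP q h1; have := hQn q h1; omega)
            (by rw [hP']; intro p hp q hq
                have hpP' : p ∈ e ::ₘ negMS h := Multiset.mem_of_le (Multiset.erase_le _ _) hp
                rcases Multiset.mem_cons.mp hq with h1 | h1
                · rw [h1]; exact hxmax p hpP'
                · rcases Multiset.mem_cons.mp hpP' with h2 | h2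
                  · by_contra hcon
                    push_neg at hcon
                    have hxe : x = e := by
                      rcases hcase with h3 | h3
                      · exact h3
                      · have := hPQ x h3 q h1; omega
                    have : p ∈ negMS h := by
                      rw [hxe, Multiset.erase_cons_head] at hp; exact hp
                    have := hPQ p this q h1
                    omega
                  · exact hPQ p h2 q h1)
            le_rfl
            (by have h6 : ((e ::ₘ negMS h).erase x).card + 1 = (e ::ₘ negMS h).card :=
                  Multiset.card_erase_add_one hxP'
                simp only [Multiset.card_cons] at h6
                rw [hP', hlen2]
                push_cast [hlenP] at h6 hcard ⊢
                omega)
            (by simp)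
            (by rw [hs1, hSfull, hP', Multiset.cons_add, addConsSwap,
                  Multiset.cons_erase hxP'])
            (by omega)
          rw [key, hsum2, Multiset.card_cons,
            show nA + x - e + (e + (negMS h).sum - x) = nA + (negMS h).sum from by ring,
            show (((Q.card + 1 : Nat)) : Int) = (Q.card : Int) + 1 from by push_cast; ring,
            show kA - 1 + ((Q.card : Int) + 1) = kA + Q.card from by ring]
      · -- A breaks; B's paid overflows on this very wave
        rw [show solGoA nA kA h cnt (e :: rest) = cnt by
          simp only [solGoA]
          rw [if_neg hpay, if_neg (by push_neg; intro h0; omega)]]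
        have hS0' : S = 0 := by
          rw [← Multiset.card_eq_zero]
          push_cast [hlenP] at hcard
          omega
        have hScard0 : S.card = 0 := by rw [hS0']; rfl
        have hcond : ((e :: skip).length : Int) > kA + Q.card := by
          simp only [List.length_cons, hskiplen, hScard0]
          push_cast
          omega
        have hs1ne : (e :: skip : List Int) ≠ [] := by simp
        obtain ⟨hm_mem, hm_min, hm_erase⟩ := heapPop_spec (e :: skip) hs1ne
        set m := (heapPop (e :: skip)).1 with hmdef
        have hmQ : m ∈ Q + (e ::ₘ S) := by rw [← hs1]; exact hm_mem
        have hmn : nA < m := by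
          rcases Multiset.mem_add.mp hmQ with hq | hxx
          · exact hQn m hq
          · rw [hS0'] at hxx
            rcases Multiset.mem_cons.mp hxx with h1 | h1
            · omega
            · simp at h1
        rw [show solGoB (nA + (negMS h).sum) (kA + Q.card) skip paid cnt (e :: rest) = cnt by
          simp only [solGoB]
          rw [if_pos hcond,
            if_pos (by rw [← hmdef, hpaid, hS0', Multiset.sum_zero]; omega)]]

-- with negative health and no skips allowed, both programs stop on the first wave
lemma neg_health_base (n k e0 : Int) (rest : List Int) (hn : n < 0) (he : 0 ≤ e0)
    (hk : k ≤ 0) :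
    solGoA n k [] 0 (e0 :: rest) = 0 ∧ solGoB n k [] 0 0 (e0 :: rest) = 0 := by
  constructor
  · simp only [solGoA]
    rw [if_neg (by omega), if_neg (by push_neg; intro h; omega)]
  · simp only [solGoB]
    rw [if_pos (show (([e0] : List Int).length : Int) > k from by simp; omega)]
    rw [show heapPop [e0] = (e0, []) from by
      simp [heapPop, List.min?_cons']]
    rw [if_pos (by simp; omega)]

-- ===== VERDICT (by name: the statement is the Claim_ definition above) =====
theorem solution_spec : Claim_equal_solution := by
  intro n k enemy _hdom hpre
  obtain ⟨hE, hcase⟩ := hpre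
  unfold Spec_solution solution solution_alt
  by_cases hn : 0 ≤ n
  · have := loop_eq enemy n k [] 0 0 0 [] 0 hE (by simp [negMS]) hn
      (by simp) (by simp) (by simp) (by simp) (by simp) (by simp) (by simp [negMS])
    simpa [negMS] using this
  · rcases hcase with h0 | hk | hemp
    · omega
    · cases enemy with
      | nil => rfl
      | cons e0 rest =>
        have h1 := neg_health_base n k e0 rest (by omega) (hE e0 (by simp)) hk
        rw [h1.1, h1.2]
    · subst hemp; rfl
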